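-- pv_equiv track=rewrite | github.com/XXG314/fac | p8 3.py | par3
-- ===== SOURCE A (Python) =====
-- def par3(i,w):
--     l=[0]*i
--     g=1
--     z=0
--     for z in range (i):
--         g*=w
--         l[z]=g
--     m = [[0 for _ in range(i)] for _ in range(i)]
--     g=w
--     f=0
--     a=g
--     for f in range (w):
--         b=a
--         g+=-1
--         a=g
--         o=1
--         s=a
--         d=1
--         k=(s>>1)+(s&1)
--         m[f][0]=o*l[s]
--         z=0
--         while s!=k:
--             o=o*b//d
--             b=s
--             m[f][s]=o*l[z]
--             s+=-1
--             m[f][d]=o*l[s]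
--             z=d
--             d+=1
--         if d==s:
--             o=o*b//d
--             m[f][s]=o*l[z]
--     return m
-- ===== SOURCE B (Python) =====
-- def par3(i, w):
--     l = [0] * i
--     g = 1
--     for z in range(i):
--         g *= w
--         l[z] = g
--     m = [[0] * i for _ in range(i)]
--     for f in range(w):
--         n = w - f
--         c = 1
--         for j in range(n):
--             m[f][j] = c * l[n - 1 - j]
--             c = c * (n - j) // (j + 1)
--     return m
-- ===== Notes on version B (the rewrite author's own statement) =====
-- stated objective: simpler
-- what changed: Replaced A's symmetry-exploiting two-ended while loop (incremental binomial recurrence writing m[f][s] and m[f][d] from both ends plus a middle fixup) by a plain forward inner loop that fills row f left to right with m[f][j] = C(n,j)*l[n-1-j], maintaining the binomial by c = c*(n-j)//(j+1).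
import Mathlib
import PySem

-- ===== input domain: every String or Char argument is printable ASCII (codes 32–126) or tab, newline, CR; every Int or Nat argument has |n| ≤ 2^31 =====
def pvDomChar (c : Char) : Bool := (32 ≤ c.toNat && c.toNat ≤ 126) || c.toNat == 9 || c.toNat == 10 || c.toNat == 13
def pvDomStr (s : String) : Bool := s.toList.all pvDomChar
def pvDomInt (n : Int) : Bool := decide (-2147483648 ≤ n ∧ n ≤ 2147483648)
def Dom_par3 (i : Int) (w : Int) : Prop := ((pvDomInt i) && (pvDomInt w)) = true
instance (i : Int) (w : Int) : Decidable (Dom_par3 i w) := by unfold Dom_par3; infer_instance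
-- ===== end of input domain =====

-- B replaces A's two-ended symmetric while loop (incremental binomial recurrence with a middle
-- fixup) by a plain forward inner loop m[f][j] = C(n,j)*l[n-1-j]; objective: simpler.

-- B replaces A's two-ended symmetric while loop (incremental binomial recurrence with a middle
-- fixup) by a plain forward inner loop m[f][j] = C(n,j)*l[n-1-j]; objective: simpler.

-- ===== PORT A =====
-- m[r][c] = v ; exact for 0 <= r < len m, 0 <= c < len m[r] (always the case under Pre_; Python raises otherwise)
def pvSet2 (m : List (List Int)) (r c : Int) (v : Int) : List (List Int) :=
  m.set r.toNat ((m.getD r.toNat []).set c.toNat v)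

-- l[z] ; exact for 0 <= z < len l (always the case under Pre_; Python raises otherwise)
def pvGetD (l : List Int) (z : Int) : Int := l.getD z.toNat 0

-- the power-table loop 'l=[0]*i; g=1; for z in range(i): g*=w; l[z]=g' (textually identical in A and in B)
def pvPowTable (i w : Int) : List Int :=
  ((PySem.List.pyRange 0 i 1).foldl
    (fun (st : List Int × Int) z => (st.1.set z.toNat (st.2 * w), st.2 * w))
    (List.replicate i.toNat 0, 1)).1

-- A's 'while s!=k' loop; fuel (s-k).toNat is exactly the number of iterations Python performs
-- (s decreases by 1 each pass and the loop stops at s==k); state (m, o, b, s, z, d)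
def par3While (l : List Int) (f k : Int) :
    Nat → List (List Int) × Int × Int × Int × Int × Int →
    List (List Int) × Int × Int × Int × Int × Int
  | 0, st => st
  | fuel+1, (m, o, b, s, z, d) =>
    if s = k then (m, o, b, s, z, d)
    else
      let o2 := PySem.Int.floordiv (o * b) d
      let m2 := pvSet2 m f s (o2 * pvGetD l z)
      let s2 := s + (-1)
      let m3 := pvSet2 m2 f d (o2 * pvGetD l s2)
      par3While l f k fuel (m3, o2, s, s2, d, d + 1)

-- one iteration of A's 'for f in range(w)' loop; state (m, g, a)
def par3Body (l : List Int) (st : List (List Int) × Int × Int) (f : Int) :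
    List (List Int) × Int × Int :=
  let b := st.2.2
  let g := st.2.1 + (-1)
  let a := g
  let o : Int := 1
  let s := a
  let d : Int := 1
  let k := (s >>> (1 : Nat)) + PySem.Int.band s 1   -- (s>>1)+(s&1), Python-exact on all ints
  let m1 := pvSet2 st.1 f 0 (o * pvGetD l s)
  let z : Int := 0
  let r := par3While l f k (s - k).toNat (m1, o, b, s, z, d)
  let m2 := r.1
  let o2 := r.2.1
  let b2 := r.2.2.1
  let s2 := r.2.2.2.1
  let z2 := r.2.2.2.2.1
  let d2 := r.2.2.2.2.2
  let mF := if d2 = s2 then pvSet2 m2 f s2 (PySem.Int.floordiv (o2 * b2) d2 * pvGetD l z2) else m2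
  (mF, g, a)

def par3 (i : Int) (w : Int) : List (List Int) :=
  let l := pvPowTable i w
  let m0 := List.replicate i.toNat (List.replicate i.toNat (0 : Int))
  ((PySem.List.pyRange 0 w 1).foldl (par3Body l) (m0, w, w)).1

-- ===== PORT B =====
-- one iteration of B's 'for f in range(w)' loop: fill row f left to right,
-- maintaining the binomial by c = c*(n-j)//(j+1)
def par3AltBody (l : List Int) (w : Int) (m : List (List Int)) (f : Int) : List (List Int) :=
  let n := w - f
  (((PySem.List.pyRange 0 n 1).foldl
    (fun (st : List (List Int) × Int) j =>
      (pvSet2 st.1 f j (st.2 * pvGetD l (n - 1 - j)),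
       PySem.Int.floordiv (st.2 * (n - j)) (j + 1)))
    (m, 1)).1)

def par3_alt (i : Int) (w : Int) : List (List Int) :=
  let l := pvPowTable i w
  let m0 := List.replicate i.toNat (List.replicate i.toNat (0 : Int))
  (PySem.List.pyRange 0 w 1).foldl (par3AltBody l w) m0

-- ===== PRECONDITION & SPEC =====
-- Pre_ excludes exactly the inputs on which A raises IndexError: for 1 <= w and w > i the
-- lookup l[w-1] (or the row access m[f]) is out of range; B raises there as well.
def Pre_par3 (i : Int) (w : Int) : Prop := w ≤ 0 ∨ w ≤ i
instance (i : Int) (w : Int) : Decidable (Pre_par3 i w) := by unfold Pre_par3; infer_instance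
def pvWitness_par3 : Int × Int := (3, 2)

def Spec_par3 (i : Int) (w : Int) (out : List (List Int)) : Prop := out = par3_alt i w
instance (i : Int) (w : Int) (out : List (List Int)) : Decidable (Spec_par3 i w out) := by unfold Spec_par3; infer_instance

-- ===== CLAIM (what is proved, stated in full; the proofs are below) =====
def Claim_equal_par3 : Prop := ∀ (i : Int) (w : Int), Dom_par3 i w → Pre_par3 i w → Spec_par3 i w (par3 i w)

-- ===== LEMMAS AND PROOFS =====

-- the closed-form entry: row r of the result has C(n,j)*w^(n-j) at column j < n, n = W-r
def entf (w : Int) (n j : Nat) : Int := if j < n then (n.choose j : Int) * w ^ (n - j) else 0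

-- a matrix given as a function of (row, col)
def MF (N : Nat) (g : Nat → Nat → Int) : List (List Int) :=
  (List.range N).map (fun r => (List.range N).map (g r))

-- the matrix after the first t rows are complete
def stageF (w : Int) (W t r j : Nat) : Int := if r < t then entf w (W - r) j else 0

-- A's partially written row f after t iterations of the while loop:
-- position 0 and the two blocks written from both ends are set
def rowPA (w : Int) (n t j : Nat) : Int :=
  if j = 0 ∨ (1 ≤ j ∧ j ≤ t) ∨ (n - t ≤ j ∧ j ≤ n - 1) then entf w n j else 0

-- the matrix during A's iteration f, the while loop having done t passes
def GA (w : Int) (W f n t r j : Nat) : Int :=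
  if r < f then entf w (W - r) j else if r = f then rowPA w n t j else 0

-- the matrix during B's iteration f, the inner loop having done t passes (row f a prefix)
def GB (w : Int) (W f n t r j : Nat) : Int :=
  if r < f then entf w (W - r) j else if r = f then (if j < t then entf w n j else 0) else 0

theorem mf_zero (N : Nat) :
    List.replicate N (List.replicate N (0 : Int)) = MF N (fun _ _ => 0) := by
  simp [MF]

theorem set_map_range {α : Type} (N : Nat) (h : Nat → α) (t : Nat) (ht : t < N) (v : α) :
    ((List.range N).map h).set t v = (List.range N).map (fun j => if j = t then v else h j) := by
  apply List.ext_getElem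
  · simp
  · intro k h1 h2
    simp only [List.getElem_set, List.getElem_map, List.getElem_range]
    by_cases hk : t = k
    · subst hk; simp
    · rw [if_neg hk, if_neg (fun hh => hk hh.symm)]

theorem getD_map_range' {α : Type} (N : Nat) (h : Nat → α) (t : Nat) (ht : t < N) (d : α) :
    ((List.range N).map h).getD t d = h t := by
  rw [List.getD_eq_getElem?_getD]
  simp [ht]

theorem pvSet2_MF (N : Nat) (g : Nat → Nat → Int) (f c : Nat) (hf : f < N) (hc : c < N) (v : Int) :
    pvSet2 (MF N g) (f : Int) (c : Int) v
      = MF N (fun r j => if r = f ∧ j = c then v else g r j) := by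
  unfold pvSet2 MF
  simp only [Int.toNat_natCast]
  rw [getD_map_range' N _ f hf, set_map_range N _ c hc, set_map_range N _ f hf]
  apply List.map_congr_left
  intro r hr
  split_ifs with h1
  · subst h1
    apply List.map_congr_left; intro j hj
    by_cases hjc : j = c <;> simp [hjc]
  · apply List.map_congr_left; intro j hj
    simp [h1]

theorem binom_step (n t : Nat) (ht : t < n) :
    PySem.Int.floordiv ((n.choose t : Int) * ((n - t : Nat) : Int)) ((t : Int) + 1)
      = (n.choose (t + 1) : Int) := by
  have h1 : ((t : Int) + 1) = ((t + 1 : Nat) : Int) := by push_cast; ring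
  have h2 : ((n.choose t : Int) * ((n - t : Nat) : Int)) = ((n.choose t * (n - t) : Nat) : Int) := by
    push_cast; ring
  rw [h1, h2, PySem.Int.floordiv_natCast]
  congr 1
  rw [← Nat.choose_succ_right_eq]
  exact Nat.mul_div_cancel _ (by omega)

theorem getL (N : Nat) (w : Int) (z : Nat) (hz : z < N) :
    pvGetD ((List.range N).map (fun j => w ^ (j + 1))) (z : Int) = w ^ (z + 1) := by
  unfold pvGetD
  simp only [Int.toNat_natCast]
  rw [getD_map_range' N _ z hz]

theorem powTable_aux (N : Nat) (w : Int) :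
    ∀ t, t ≤ N →
    (PySem.List.pyRange 0 (t : Int) 1).foldl
      (fun (st : List Int × Int) z => (st.1.set z.toNat (st.2 * w), st.2 * w))
      (List.replicate N 0, 1)
    = ((List.range N).map (fun j => if j < t then w ^ (j + 1) else 0), w ^ t) := by
  intro t
  induction t with
  | zero =>
    intro _
    rw [PySem.List.pyRange_one_eq_nil (by omega)]
    simp only [List.foldl_nil, pow_zero, Prod.mk.injEq]
    refine ⟨?_, trivial⟩
    apply List.ext_getElem <;> simp
  | succ t ih =>
    intro ht
    have hc : ((t + 1 : Nat) : Int) = (t : Int) + 1 := by push_cast; ring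
    rw [hc, PySem.List.pyRange_one_succ_right (by omega), List.foldl_append, ih (by omega)]
    simp only [List.foldl_cons, List.foldl_nil, Int.toNat_natCast, Prod.mk.injEq]
    refine ⟨?_, (pow_succ w t).symm⟩
    rw [set_map_range N _ t (by omega)]
    apply List.map_congr_left
    intro j hj
    by_cases h1 : j = t
    · subst h1; simp [pow_succ]
    · by_cases h2 : j < t <;> by_cases h3 : j < t + 1 <;> simp [h1, h2, h3] <;> omega

theorem powTable_eq (N : Nat) (w : Int) :
    pvPowTable (N : Int) w = (List.range N).map (fun j => w ^ (j + 1)) := by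
  unfold pvPowTable
  have h0 : ((N : Int)).toNat = N := by omega
  rw [h0, powTable_aux N w N (le_refl N)]
  apply List.map_congr_left
  intro j hj
  simp at hj
  simp [hj]

theorem kshift (u : Nat) : ((u:Int) >>> (1:Nat)) + PySem.Int.band (u:Int) 1 = ((u - u/2 : Nat) : Int) := by
  have h1 : ((u:Int) >>> (1:Nat)) = ((u >>> 1 : Nat) : Int) := rfl
  have h2 : PySem.Int.band (u:Int) 1 = ((u &&& 1 : Nat) : Int) := by
    have := PySem.Int.band_natCast u 1
    simpa using this
  rw [h1, h2, Nat.shiftRight_one, Nat.and_one_is_mod]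
  omega

theorem par3While_inv (w : Int) (N W f n u : Nat) (hf : f < W) (hWN : W ≤ N)
    (hn : n = W - f) (hu : u = n - 1) :
    ∀ (r t : Nat), t + r = u / 2 →
    par3While ((List.range N).map (fun j => w ^ (j + 1))) (f : Int) ((u - u / 2 : Nat) : Int) r
        (MF N (GA w W f n t), (n.choose t : Int), ((n - t : Nat) : Int),
          ((u - t : Nat) : Int), (t : Int), (t : Int) + 1)
      = (MF N (GA w W f n (u / 2)), (n.choose (u / 2) : Int), ((n - u / 2 : Nat) : Int),
          ((u - u / 2 : Nat) : Int), ((u / 2 : Nat) : Int), ((u / 2 : Nat) : Int) + 1) := by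
  intro r
  induction r with
  | zero =>
    intro t hrt
    have ht : t = u / 2 := by omega
    subst ht
    rfl
  | succ r ih =>
    intro t hrt
    have htu : t < u / 2 := by omega
    have hn1 : 1 ≤ n := by omega
    have htn : t < n := by omega
    have htu' : t < u := by omega
    have hNn : n ≤ N := by omega
    simp only [par3While]
    rw [if_neg (by omega)]
    have e1 : PySem.Int.floordiv ((n.choose t : Int) * ((n - t : Nat) : Int)) ((t : Int) + 1)
        = (n.choose (t + 1) : Int) := binom_step n t htn
    simp only [e1]
    have g1 : pvGetD ((List.range N).map (fun j => w ^ (j + 1))) (t : Int) = w ^ (t + 1) :=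
      getL N w t (by omega)
    simp only [g1]
    have c1 : pvSet2 (MF N (GA w W f n t)) (f : Int) ((u - t : Nat) : Int)
        ((n.choose (t + 1) : Int) * w ^ (t + 1))
        = MF N (fun r j => if r = f ∧ j = u - t then (n.choose (t + 1) : Int) * w ^ (t + 1)
            else GA w W f n t r j) :=
      pvSet2_MF N _ f (u - t) (by omega) (by omega) _
    simp only [c1]
    have e2 : ((u - t : Nat) : Int) + (-1) = ((u - (t + 1) : Nat) : Int) := by omega
    simp only [e2]
    have g2 : pvGetD ((List.range N).map (fun j => w ^ (j + 1))) ((u - (t + 1) : Nat) : Int)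
        = w ^ (u - (t + 1) + 1) := getL N w (u - (t + 1)) (by omega)
    simp only [g2]
    have e3 : ((t : Int) + 1) = ((t + 1 : Nat) : Int) := by omega
    simp only [e3]
    have c2 : pvSet2 (MF N (fun r j => if r = f ∧ j = u - t then (n.choose (t + 1) : Int) * w ^ (t + 1)
            else GA w W f n t r j)) (f : Int) ((t + 1 : Nat) : Int)
        ((n.choose (t + 1) : Int) * w ^ (u - (t + 1) + 1))
        = MF N (fun r j => if r = f ∧ j = t + 1 then (n.choose (t + 1) : Int) * w ^ (u - (t + 1) + 1)
            else if r = f ∧ j = u - t then (n.choose (t + 1) : Int) * w ^ (t + 1)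
            else GA w W f n t r j) :=
      pvSet2_MF N _ f (t + 1) (by omega) (by omega) _
    simp only [c2]
    have hm : (fun r j => if r = f ∧ j = t + 1 then (n.choose (t + 1) : Int) * w ^ (u - (t + 1) + 1)
            else if r = f ∧ j = u - t then (n.choose (t + 1) : Int) * w ^ (t + 1)
            else GA w W f n t r j) = GA w W f n (t + 1) := by
      funext r j
      by_cases h1 : r = f ∧ j = t + 1
      · rw [if_pos h1]
        obtain ⟨hr, hj⟩ := h1
        subst hr hj
        unfold GA rowPA entf
        rw [if_neg (by omega), if_pos rfl, if_pos (by omega), if_pos (by omega)]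
        rw [show u - (t + 1) + 1 = n - (t + 1) from by omega]

      · rw [if_neg h1]
        by_cases h2 : r = f ∧ j = u - t
        · rw [if_pos h2]
          obtain ⟨hr, hj⟩ := h2
          subst hr hj
          unfold GA rowPA entf
          rw [if_neg (by omega), if_pos rfl, if_pos (by omega), if_pos (by omega)]
          rw [show u - t = n - (t + 1) by omega, Nat.choose_symm (by omega)]
          rw [show n - (n - (t + 1)) = t + 1 from by omega]

        · rw [if_neg h2]
          unfold GA rowPA
          by_cases hr : r < f
          · simp [hr]
          · by_cases hrf : r = f
            · subst hrf
              rw [if_neg hr, if_pos rfl, if_neg hr, if_pos rfl]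
              by_cases hc : j = 0 ∨ 1 ≤ j ∧ j ≤ t ∨ n - t ≤ j ∧ j ≤ n - 1
              · rw [if_pos hc, if_pos (by omega)]
              · rw [if_neg hc, if_neg (by push_neg at h1 h2 hc ⊢; omega)]
            · simp [hr, hrf]
    rw [hm]
    have e4 : ((u - t : Nat) : Int) = ((u - (t + 1) : Nat) : Int) + 1 := by omega
    have e5 : ((u - (t + 1) : Nat) : Int) = ((u - t : Nat) : Int) + (-1) := by omega
    have := ih (t + 1) (by omega)
    rw [show ((t + 1 : Nat) : Int) = (t : Int) + 1 by omega] at this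
    rw [show ((n - (t + 1) : Nat) : Int) = ((u - t : Nat) : Int) by omega] at this
    exact this

theorem GA0_eq (w : Int) (N W f : Nat) (hf : f < W) :
    (fun r j => if r = f ∧ j = 0 then 1 * w ^ (W - f - 1 + 1) else stageF w W f r j)
      = GA w W (f) (W - f) 0 := by
  funext r j
  by_cases h1 : r = f ∧ j = 0
  · rw [if_pos h1, h1.1, h1.2]
    unfold GA rowPA entf
    rw [if_neg (lt_irrefl f), if_pos rfl, if_pos (by omega), if_pos (by omega),
      show W - f - (0:Nat) = W - f - 1 + 1 from by omega]
    simp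
  · rw [if_neg h1]
    unfold GA rowPA stageF entf
    split_ifs <;> first | rfl | omega

theorem GAfin_odd (w : Int) (N W f : Nat) (hf : f < W) (hev : (W - f - 1) % 2 = 0) :
    GA w W f (W - f) ((W - f - 1) / 2) = stageF w W (f + 1) := by
  funext r j
  unfold GA rowPA stageF entf
  split_ifs <;> first | rfl | omega | (rw [show W - f = W - r from by omega])

theorem GAfin_even (w : Int) (N W f : Nat) (hf : f < W) (hodd : (W - f - 1) % 2 = 1) :
    (fun r j => if r = f ∧ j = (W - f - 1) / 2 + 1
        then ((W - f).choose ((W - f - 1) / 2 + 1) : Int) * w ^ ((W - f - 1) / 2 + 1)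
        else GA w W f (W - f) ((W - f - 1) / 2) r j)
      = stageF w W (f + 1) := by
  funext r j
  by_cases h1 : r = f ∧ j = (W - f - 1) / 2 + 1
  · rw [if_pos h1, h1.1, h1.2]
    unfold stageF entf
    rw [if_pos (by omega), if_pos (by omega),
      show W - f - ((W - f - 1) / 2 + 1) = (W - f - 1) / 2 + 1 from by omega]
  · rw [if_neg h1]
    unfold GA rowPA stageF entf
    split_ifs <;> first | rfl | omega | (rw [show W - f = W - r from by omega])

theorem par3Body_eq (w : Int) (N W f : Nat) (hw : w = (W : Int)) (hf : f < W) (hWN : W ≤ N) :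
    par3Body ((List.range N).map (fun j => w ^ (j + 1)))
        (MF N (stageF w W f), (W : Int) - f, (W : Int) - f) (f : Int)
      = (MF N (stageF w W (f + 1)), (W : Int) - f - 1, (W : Int) - f - 1) := by
  have hn1 : 1 ≤ W - f := by omega
  unfold par3Body
  simp only
  rw [show ((W : Int) - f + (-1)) = ((W - f - 1 : Nat) : Int) from by omega]
  rw [kshift (W - f - 1)]
  rw [getL N w (W - f - 1) (by omega)]
  rw [show (0 : Int) = ((0 : Nat) : Int) from rfl]
  rw [pvSet2_MF N _ f 0 (by omega) (by omega) _]
  rw [GA0_eq w N W f hf]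
  rw [show ((( W - f - 1 : Nat) : Int) - ((W - f - 1 - (W - f - 1) / 2 : Nat) : Int)).toNat
      = (W - f - 1) / 2 from by omega]
  rw [show (MF N (GA w W f (W - f) 0), (1 : Int), (W : Int) - f, ((W - f - 1 : Nat) : Int),
        ((0 : Nat) : Int), (1 : Int))
      = (MF N (GA w W f (W - f) 0), (((W - f).choose 0 : Nat) : Int), ((W - f - 0 : Nat) : Int),
        ((W - f - 1 - 0 : Nat) : Int), ((0 : Nat) : Int), ((0 : Nat) : Int) + 1) from by
    simp [Prod.ext_iff]
    omega]
  rw [par3While_inv w N W f (W - f) (W - f - 1) hf hWN rfl rfl ((W - f - 1) / 2) 0 (by omega)]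
  simp only
  rcases Nat.even_or_odd (W - f - 1) with hpar | hpar
  · -- u even: n odd, no middle write
    rw [if_neg (show ¬((((W - f - 1) / 2 : Nat) : Int) + 1
        = ((W - f - 1 - (W - f - 1) / 2 : Nat) : Int)) from by
      rcases hpar with ⟨c, hc⟩
      omega)]
    rw [GAfin_odd w N W f hf (by rcases hpar with ⟨c, hc⟩; omega)]
    refine Prod.ext rfl (Prod.ext ?_ ?_) <;> simp <;> omega
  · -- u odd: n even, middle write
    have hodd : (W - f - 1) % 2 = 1 := Nat.odd_iff.mp hpar
    rw [if_pos (show (((W - f - 1) / 2 : Nat) : Int) + 1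
        = ((W - f - 1 - (W - f - 1) / 2 : Nat) : Int) from by omega)]
    rw [binom_step (W - f) ((W - f - 1) / 2) (by omega)]
    rw [getL N w ((W - f - 1) / 2) (by omega)]
    rw [show ((W - f - 1 - (W - f - 1) / 2 : Nat) : Int) = (((W - f - 1) / 2 + 1 : Nat) : Int)
      from by omega]
    rw [pvSet2_MF N _ f ((W - f - 1) / 2 + 1) (by omega) (by omega) _]
    rw [GAfin_even w N W f hf hodd]
    refine Prod.ext rfl (Prod.ext ?_ ?_) <;> simp <;> omega

theorem GB0_eq (w : Int) (N W f : Nat) (hf : f < W) :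
    stageF w W f = GB w W f (W - f) 0 := by
  funext r j
  unfold GB stageF
  split_ifs <;> first | rfl | omega

theorem GBstep (w : Int) (N W f t : Nat) (hf : f < W) (ht : t < W - f) :
    (fun r j => if r = f ∧ j = t then ((W - f).choose t : Int) * w ^ (W - f - 1 - t + 1)
        else GB w W f (W - f) t r j)
      = GB w W f (W - f) (t + 1) := by
  funext r j
  by_cases h1 : r = f ∧ j = t
  · rw [if_pos h1, h1.1, h1.2]
    unfold GB entf
    rw [if_neg (lt_irrefl f), if_pos rfl, if_pos (by omega), if_pos (by omega),
      show W - f - 1 - t + 1 = W - f - t from by omega]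
  · rw [if_neg h1]
    unfold GB
    split_ifs <;> first | rfl | omega

theorem GBfin (w : Int) (N W f : Nat) (hf : f < W) :
    GB w W f (W - f) (W - f) = stageF w W (f + 1) := by
  funext r j
  unfold GB stageF entf
  split_ifs <;> first | rfl | omega | (rw [show W - f = W - r from by omega])

theorem altInner (w : Int) (N W f : Nat) (hf : f < W) (hWN : W ≤ N) :
    ∀ t, t ≤ W - f →
    ((PySem.List.pyRange 0 ((t : Nat) : Int) 1).foldl
      (fun (st : List (List Int) × Int) j =>
        (pvSet2 st.1 (f : Int) j
          (st.2 * pvGetD ((List.range N).map (fun q => w ^ (q + 1))) (((W - f : Nat) : Int) - 1 - j)),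
         PySem.Int.floordiv (st.2 * (((W - f : Nat) : Int) - j)) (j + 1)))
      (MF N (GB w W f (W - f) 0), 1))
    = (MF N (GB w W f (W - f) t), ((W - f).choose t : Int)) := by
  intro t
  induction t with
  | zero =>
    intro _
    rw [PySem.List.pyRange_one_eq_nil (by omega)]
    simp
  | succ t ih =>
    intro ht
    rw [show ((t + 1 : Nat) : Int) = ((t : Nat) : Int) + 1 from by omega,
      PySem.List.pyRange_one_succ_right (by omega), List.foldl_append, ih (by omega)]
    simp only [List.foldl_cons, List.foldl_nil]
    rw [show (((W - f : Nat) : Int) - 1 - ((t : Nat) : Int)) = ((W - f - 1 - t : Nat) : Int)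
      from by omega]
    rw [getL N w (W - f - 1 - t) (by omega)]
    rw [pvSet2_MF N _ f t (by omega) (by omega) _]
    rw [GBstep w N W f t hf (by omega)]
    rw [show (((W - f : Nat) : Int) - ((t : Nat) : Int)) = ((W - f - t : Nat) : Int) from by omega]
    rw [binom_step (W - f) t (by omega)]

theorem par3AltBody_eq (w : Int) (N W f : Nat) (hw : w = (W : Int)) (hf : f < W) (hWN : W ≤ N) :
    par3AltBody ((List.range N).map (fun q => w ^ (q + 1))) w (MF N (stageF w W f)) (f : Int)
      = MF N (stageF w W (f + 1)) := by
  unfold par3AltBody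
  simp only
  rw [show w - (f : Int) = ((W - f : Nat) : Int) from by omega]
  rw [GB0_eq w N W f hf]
  rw [altInner w N W f hf hWN (W - f) (le_refl _)]
  rw [show GB w W f (W - f) (W - f) = stageF w W (f + 1) from GBfin w N W f hf]

theorem outerA (w : Int) (N W : Nat) (hw : w = (W : Int)) (hWN : W ≤ N) :
    ∀ t, t ≤ W →
    (PySem.List.pyRange 0 ((t : Nat) : Int) 1).foldl
        (par3Body ((List.range N).map (fun q => w ^ (q + 1))))
        (MF N (stageF w W 0), (W : Int), (W : Int))
      = (MF N (stageF w W t), (W : Int) - t, (W : Int) - t) := by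
  intro t
  induction t with
  | zero =>
    intro _
    rw [PySem.List.pyRange_one_eq_nil (by omega)]
    simp
  | succ t ih =>
    intro ht
    rw [show ((t + 1 : Nat) : Int) = ((t : Nat) : Int) + 1 from by omega,
      PySem.List.pyRange_one_succ_right (by omega), List.foldl_append, ih (by omega)]
    simp only [List.foldl_cons, List.foldl_nil]
    rw [show ((W : Int) - t) = (W : Int) - (t : Int) from rfl]
    rw [par3Body_eq w N W t hw (by omega) hWN]
    refine Prod.ext rfl (Prod.ext ?_ ?_) <;> simp <;> omega

theorem outerB (w : Int) (N W : Nat) (hw : w = (W : Int)) (hWN : W ≤ N) :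
    ∀ t, t ≤ W →
    (PySem.List.pyRange 0 ((t : Nat) : Int) 1).foldl
        (par3AltBody ((List.range N).map (fun q => w ^ (q + 1))) w)
        (MF N (stageF w W 0))
      = MF N (stageF w W t) := by
  intro t
  induction t with
  | zero =>
    intro _
    rw [PySem.List.pyRange_one_eq_nil (by omega)]
    rfl
  | succ t ih =>
    intro ht
    rw [show ((t + 1 : Nat) : Int) = ((t : Nat) : Int) + 1 from by omega,
      PySem.List.pyRange_one_succ_right (by omega), List.foldl_append, ih (by omega)]
    simp only [List.foldl_cons, List.foldl_nil]
    rw [par3AltBody_eq w N W t hw (by omega) hWN]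

theorem stage0 (w : Int) (N W : Nat) : MF N (fun _ _ => 0) = MF N (stageF w W 0) := by
  unfold MF stageF
  simp

theorem par3_eq_MF (i w : Int) (hw : 0 < w) (hwi : w ≤ i) :
    par3 i w = MF i.toNat (stageF w w.toNat w.toNat) := by
  have hi : i = ((i.toNat : Nat) : Int) := by omega
  have hWN : w.toNat ≤ i.toNat := by omega
  have hww : w = ((w.toNat : Nat) : Int) := by omega
  unfold par3
  simp only
  rw [hi, Int.toNat_natCast, powTable_eq i.toNat w, mf_zero, stage0 w i.toNat w.toNat]
  have h := outerA w i.toNat w.toNat hww hWN w.toNat (le_refl _)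
  rw [← hww] at h
  rw [h]

theorem par3_alt_eq_MF (i w : Int) (hw : 0 < w) (hwi : w ≤ i) :
    par3_alt i w = MF i.toNat (stageF w w.toNat w.toNat) := by
  have hi : i = ((i.toNat : Nat) : Int) := by omega
  have hWN : w.toNat ≤ i.toNat := by omega
  have hww : w = ((w.toNat : Nat) : Int) := by omega
  unfold par3_alt
  simp only
  rw [hi, Int.toNat_natCast, powTable_eq i.toNat w, mf_zero, stage0 w i.toNat w.toNat]
  have h := outerB w i.toNat w.toNat hww hWN w.toNat (le_refl _)
  rw [← hww] at h
  rw [h]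

-- ===== VERDICT (by name: the statement is the Claim_ definition above) =====
theorem par3_spec : Claim_equal_par3 := by
  intro i w _ hpre
  unfold Spec_par3
  rcases (by omega : w ≤ 0 ∨ 0 < w) with hw | hw
  · simp [par3, par3_alt, PySem.List.pyRange_one_eq_nil hw]
  · rcases hpre with h | h
    · omega
    · rw [par3_eq_MF i w hw h, par3_alt_eq_MF i w hw h]
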